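-- pv_equiv track=rewrite | github.com/SebastianNagl/CourtPressGER | courtpressger/summarizer_hier/chunk.py | find_punctuations
-- ===== SOURCE A (Python) =====
-- def find_punctuations(text, comma=False):
--     """
--     Find indices of punctuation marks in the text.
--     If comma=True, also consider commas as punctuation.
--     """
--     if comma:
--         puncs = ['.', '?', '!', ',', '."', '?"', '!"', ".'", "?'", "!'"]
--     else:
--         puncs = ['.', '?', '!', '."', '?"', '!"', ".'", "?'", "!'"]
--
--     puncs_idx = []
--
--     for i, c in enumerate(text):
--         # Direct single-character punctuation check
--         if c in puncs:
--             puncs_idx.append(i)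
--         # Handle quotes that follow ., ?, or ! (e.g. '."' or '!"')
--         elif c in ['"', "'"] and i > 0:
--             if text[i-1] in ['.', '?', '!']:
--                 puncs_idx.append(i)
--     return puncs_idx
-- ===== SOURCE B (Python) =====
-- def _merge(xs, ys):
--     """Merge two ascending lists of ints (two pointers)."""
--     i = j = 0
--     out = []
--     while i < len(xs) and j < len(ys):
--         if xs[i] <= ys[j]:
--             out.append(xs[i]); i += 1
--         else:
--             out.append(ys[j]); j += 1
--     return out + xs[i:] + ys[j:]
--
--
-- def find_punctuations(text, comma=False):
--     """
--     Find indices of punctuation marks in the text.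
--     If comma=True, also consider commas as punctuation.
--     """
--     enders = '.?!,' if comma else '.?!'
--     # pass 1: positions of the punctuation marks themselves
--     marks = [i for i, c in enumerate(text) if c in enders]
--     # pass 2: positions of quotes immediately after a sentence-ending mark,
--     # found by scanning adjacent character pairs
--     quotes = [i + 1 for i, pair in enumerate(zip(text, text[1:]))
--               if pair[0] in '.?!' and pair[1] in '"\'']
--     return _merge(marks, quotes)
-- ===== Notes on version B (the rewrite author's own statement) =====
-- stated objective: alternative
-- what changed: A's single conditional scan with a manual text[i-1] look-back is replaced by two staged passes -- one collecting mark positions, one collecting quote positions by scanning adjacent character pairs -- whose ascending index lists are combined by an explicit two-pointer merge.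
import Mathlib
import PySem

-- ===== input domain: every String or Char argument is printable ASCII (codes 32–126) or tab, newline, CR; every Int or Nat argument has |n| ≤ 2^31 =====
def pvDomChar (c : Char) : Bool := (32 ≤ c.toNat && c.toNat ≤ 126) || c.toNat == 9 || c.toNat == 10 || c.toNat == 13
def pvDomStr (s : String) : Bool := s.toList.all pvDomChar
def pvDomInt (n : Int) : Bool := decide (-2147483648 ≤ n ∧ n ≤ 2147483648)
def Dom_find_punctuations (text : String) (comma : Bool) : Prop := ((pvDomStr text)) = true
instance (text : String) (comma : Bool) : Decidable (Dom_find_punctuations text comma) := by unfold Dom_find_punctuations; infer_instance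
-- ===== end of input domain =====

-- B replaces A's single conditional scan with a text[i-1] look-back by two staged passes
-- (mark positions; quote positions found over adjacent character pairs) merged by a
-- two-pointer merge of the two ascending index lists.

-- ===== PORT A =====
-- Python strings in `puncs` are modelled as their char lists (PySem.Chars convention);
-- `c in puncs` compares the 1-char string [c] with each entry.
def pvStepA (text : String) (puncs : List (List Char)) (acc : List Int) (p : Int × Char) : List Int :=
  if [p.2] ∈ puncs then acc ++ [p.1]
  else if (p.2 = '"' ∨ p.2 = '\'') ∧ p.1 > 0 then
    match PySem.List.pyGet? text.toList (p.1 - 1) with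
    | some q => if q = '.' ∨ q = '?' ∨ q = '!' then acc ++ [p.1] else acc
    | none => acc
  else acc

def find_punctuations (text : String) (comma : Bool) : List Int :=
  let puncs : List (List Char) :=
    if comma then [['.'], ['?'], ['!'], [','], ['.', '"'], ['?', '"'], ['!', '"'], ['.', '\''], ['?', '\''], ['!', '\'']]
    else [['.'], ['?'], ['!'], ['.', '"'], ['?', '"'], ['!', '"'], ['.', '\''], ['?', '\''], ['!', '\'']]
  (PySem.List.enumerate text.toList).foldl (pvStepA text puncs) []

-- ===== PORT B =====
-- transliteration of Source B's `_merge`: the two-pointer while loop as structural recursion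
def pvMerge : List Int → List Int → List Int
  | [], ys => ys
  | x :: xs, [] => x :: xs
  | x :: xs, y :: ys => if x ≤ y then x :: pvMerge xs (y :: ys) else y :: pvMerge (x :: xs) ys

def find_punctuations_alt (text : String) (comma : Bool) : List Int :=
  let enders : List Char := if comma then ['.', '?', '!', ','] else ['.', '?', '!']
  let l := text.toList
  let marks : List Int := (PySem.List.enumerate l).filterMap
    (fun p => if p.2 ∈ enders then some p.1 else none)
  let quotes : List Int := (PySem.List.enumerate (List.zip l (l.drop 1))).filterMap
    (fun p => if (p.2.1 = '.' ∨ p.2.1 = '?' ∨ p.2.1 = '!') ∧ (p.2.2 = '"' ∨ p.2.2 = '\'')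
              then some (p.1 + 1) else none)
  pvMerge marks quotes

-- ===== PRECONDITION & SPEC =====
def Spec_find_punctuations (text : String) (comma : Bool) (out : List Int) : Prop := out = find_punctuations_alt text comma
instance (text : String) (comma : Bool) (out : List Int) : Decidable (Spec_find_punctuations text comma out) := by unfold Spec_find_punctuations; infer_instance

-- ===== CLAIM (what is proved, stated in full; the proofs are below) =====
def Claim_equal_find_punctuations : Prop := ∀ (text : String) (comma : Bool), Dom_find_punctuations text comma → Spec_find_punctuations text comma (find_punctuations text comma)

-- ===== LEMMAS AND PROOFS =====

-- proof-only views of B's two passes, parameterised by suffix, previous char and start index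
def pvM (enders : List Char) (suf : List Char) (n : Int) : List Int :=
  (PySem.List.enumerate suf n).filterMap (fun p => if p.2 ∈ enders then some p.1 else none)

def pvQ (q : Char) (suf : List Char) (n : Int) : List Int :=
  (PySem.List.enumerate (List.zip (q :: suf) suf) n).filterMap
    (fun p => if (p.2.1 = '.' ∨ p.2.1 = '?' ∨ p.2.1 = '!') ∧ (p.2.2 = '"' ∨ p.2.2 = '\'')
              then some p.1 else none)

theorem pvM_cons (enders : List Char) (c : Char) (rest : List Char) (n : Int) :
    pvM enders (c :: rest) n
      = (if c ∈ enders then [n] else []) ++ pvM enders rest (n + 1) := by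
  unfold pvM
  rw [PySem.List.enumerate_cons]
  by_cases h : c ∈ enders <;> simp [h]

theorem pvQ_cons (q c : Char) (rest : List Char) (n : Int) :
    pvQ q (c :: rest) n
      = (if (q = '.' ∨ q = '?' ∨ q = '!') ∧ (c = '"' ∨ c = '\'') then [n] else [])
        ++ pvQ c rest (n + 1) := by
  unfold pvQ
  rw [List.zip_cons_cons, PySem.List.enumerate_cons]
  by_cases h : (q = '.' ∨ q = '?' ∨ q = '!') ∧ (c = '"' ∨ c = '\'') <;> simp [h]

theorem pvM_lb (enders : List Char) (suf : List Char) (n : Int) :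
    ∀ x ∈ pvM enders suf n, n ≤ x := by
  induction suf generalizing n with
  | nil => simp [pvM, PySem.List.enumerate]
  | cons c rest ih =>
    intro x hx
    rw [pvM_cons] at hx
    rcases List.mem_append.1 hx with h | h
    · split_ifs at h <;> simp_all
    · have := ih (n + 1) x h; omega

theorem pvQ_lb (q : Char) (suf : List Char) (n : Int) :
    ∀ x ∈ pvQ q suf n, n ≤ x := by
  induction suf generalizing q n with
  | nil => simp [pvQ, PySem.List.enumerate]
  | cons c rest ih =>
    intro x hx
    rw [pvQ_cons] at hx
    rcases List.mem_append.1 hx with h | h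
    · split_ifs at h <;> simp_all
    · have := ih c (n + 1) x h; omega

theorem pvMerge_cons_left (x : Int) (xs ys : List Int) (h : ∀ y ∈ ys, x < y) :
    pvMerge (x :: xs) ys = x :: pvMerge xs ys := by
  cases ys with
  | nil => cases xs <;> simp [pvMerge]
  | cons y ys' =>
    have : x ≤ y := le_of_lt (h y (by simp))
    simp [pvMerge, this]

theorem pvMerge_cons_right (y : Int) (xs ys : List Int) (h : ∀ x ∈ xs, y < x) :
    pvMerge xs (y :: ys) = y :: pvMerge xs ys := by
  cases xs with
  | nil => simp [pvMerge]
  | cons x xs' =>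
    have : ¬ x ≤ y := not_le.2 (h x (by simp))
    simp [pvMerge, this]

-- enumerate shifted by one vs mapping +1 on the index
theorem pv_enumerate_shift {α : Type} (xs : List α) (k : Int) :
    PySem.List.enumerate xs (k + 1) = (PySem.List.enumerate xs k).map (fun p => (p.1 + 1, p.2)) := by
  induction xs generalizing k with
  | nil => simp [PySem.List.enumerate]
  | cons c rest ih => simp [PySem.List.enumerate_cons, ih]

theorem pv_enumerate_one {α : Type} (xs : List α) :
    PySem.List.enumerate xs 1 = (PySem.List.enumerate xs 0).map (fun p => (p.1 + 1, p.2)) := by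
  have h := pv_enumerate_shift xs 0
  norm_num at h
  exact h

theorem pv_main (text : String) (puncs : List (List Char)) (enders : List Char)
    (hcond : ∀ c : Char, [c] ∈ puncs ↔ c ∈ enders)
    (hdisj : ∀ c ∈ enders, ¬ (c = '"' ∨ c = '\'')) 
    (pre suf : List Char) (hfull : text.toList = pre ++ suf) (hpre : pre ≠ []) (acc : List Int) :
    (PySem.List.enumerate suf (pre.length : Int)).foldl (pvStepA text puncs) acc
      = acc ++ pvMerge (pvM enders suf (pre.length : Int)) (pvQ (pre.getLastD ' ') suf (pre.length : Int)) := by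
  induction suf generalizing pre acc with
  | nil => simp [PySem.List.enumerate, pvM, pvQ, pvMerge]
  | cons c rest ih =>
    rcases List.eq_nil_or_concat pre with h0 | ⟨p', q, hpq⟩
    · exact absurd h0 hpre
    have hlast : pre.getLastD ' ' = q := by rw [hpq]; simp
    have hpos : ((pre.length : Int) > 0) := by rw [hpq]; simp
    have hget : PySem.List.pyGet? text.toList ((pre.length : Int) - 1) = some q := by
      have htl : text.toList = p' ++ (q :: (c :: rest)) := by rw [hfull, hpq]; simp
      have hlen : (pre.length : Int) - 1 = (p'.length : Int) := by rw [hpq]; simp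
      rw [htl, hlen, PySem.List.pyGet?_append_length]
    have hstep : pvStepA text puncs acc ((pre.length : Int), c)
        = acc ++ (if c ∈ enders then [(pre.length : Int)]
                  else if (q = '.' ∨ q = '?' ∨ q = '!') ∧ (c = '"' ∨ c = '\'') then [(pre.length : Int)]
                  else []) := by
      unfold pvStepA
      by_cases h1 : c ∈ enders
      · simp [(hcond c).2 h1, h1]
      · have h1' : [c] ∉ puncs := fun h => h1 ((hcond c).1 h)
        by_cases h2 : c = '"' ∨ c = '\''
        · simp only [h1', if_false, h2, hpos, and_self, if_true, hget, h1]
          split_ifs with h3 <;> simp_all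
        · simp [h1', h1, h2]
    have hIH := ih (pre ++ [c]) (by rw [hfull]; simp)
      (by simp) (pvStepA text puncs acc ((pre.length : Int), c))
    have hlen1 : ((pre ++ [c]).length : Int) = (pre.length : Int) + 1 := by simp
    rw [hlen1, List.getLastD_concat] at hIH
    rw [PySem.List.enumerate_cons, List.foldl_cons, hIH, hstep]
    rw [pvM_cons, pvQ_cons, hlast]
    by_cases h1 : c ∈ enders
    · have hq : ¬ ((q = '.' ∨ q = '?' ∨ q = '!') ∧ (c = '"' ∨ c = '\'')) := by
        intro h; exact hdisj c h1 h.2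
      simp only [h1, hq, if_true, if_false, ite_true, ite_false, List.nil_append,
        List.singleton_append]
      rw [pvMerge_cons_left _ _ _
        (fun y hy => by have := pvQ_lb c rest ((pre.length : Int) + 1) y hy; omega)]
      simp
    · by_cases h2 : (q = '.' ∨ q = '?' ∨ q = '!') ∧ (c = '"' ∨ c = '\'')
      · simp only [h1, h2, and_self, if_true, if_false, ite_true, ite_false, List.nil_append,
          List.singleton_append]
        rw [pvMerge_cons_right _ _ _
          (fun x hx => by have := pvM_lb enders rest ((pre.length : Int) + 1) x hx; omega)]
        simp
      · simp only [h1, h2, if_false, ite_false, List.nil_append, List.append_nil]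

theorem pv_top (text : String) (puncs : List (List Char)) (enders : List Char)
    (hcond : ∀ c : Char, [c] ∈ puncs ↔ c ∈ enders)
    (hdisj : ∀ c ∈ enders, ¬ (c = '"' ∨ c = '\'')) :
    (PySem.List.enumerate text.toList).foldl (pvStepA text puncs) []
      = pvMerge
          ((PySem.List.enumerate text.toList).filterMap
            (fun p => if p.2 ∈ enders then some p.1 else none))
          ((PySem.List.enumerate (List.zip text.toList (text.toList.drop 1))).filterMap
            (fun p => if (p.2.1 = '.' ∨ p.2.1 = '?' ∨ p.2.1 = '!') ∧ (p.2.2 = '"' ∨ p.2.2 = '\'')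
                      then some (p.1 + 1) else none)) := by
  cases h : text.toList with
  | nil => simp [PySem.List.enumerate, pvMerge]
  | cons c0 rest =>
    have hquotes : pvQ c0 rest 1
        = (PySem.List.enumerate (List.zip (c0 :: rest) ((c0 :: rest).drop 1))).filterMap
            (fun p => if (p.2.1 = '.' ∨ p.2.1 = '?' ∨ p.2.1 = '!') ∧ (p.2.2 = '"' ∨ p.2.2 = '\'')
                      then some (p.1 + 1) else none) := by
      unfold pvQ
      rw [List.drop_one, List.tail_cons, pv_enumerate_one, List.filterMap_map]
      rfl
    rw [← hquotes]
    have hmarks : (PySem.List.enumerate (c0 :: rest)).filterMap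
        (fun p => if p.2 ∈ enders then some p.1 else none) = pvM enders (c0 :: rest) 0 := rfl
    rw [hmarks]
    have hstep0 : pvStepA text puncs [] ((0 : Int), c0)
        = (if c0 ∈ enders then [(0 : Int)] else []) := by
      unfold pvStepA
      by_cases h1 : c0 ∈ enders
      · simp [(hcond c0).2 h1, h1]
      · have h1' : [c0] ∉ puncs := fun hh => h1 ((hcond c0).1 hh)
        simp [h1', h1]
    have hmain := pv_main text puncs enders hcond hdisj [c0] rest (by rw [h]; simp)
      (by simp) (pvStepA text puncs [] ((0 : Int), c0))
    have hlen : (([c0] : List Char).length : Int) = 1 := by simp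
    have hlastc : ([c0] : List Char).getLastD ' ' = c0 := by simp
    rw [hlen, hlastc] at hmain
    rw [PySem.List.enumerate_cons, List.foldl_cons]
    simp only [zero_add]
    rw [hmain, hstep0, pvM_cons]
    simp only [zero_add]
    by_cases h1 : c0 ∈ enders
    · simp only [h1, if_true, ite_true, List.singleton_append]
      rw [pvMerge_cons_left _ _ _
        (fun y hy => by have := pvQ_lb c0 rest 1 y hy; omega)]
    · simp only [h1, if_false, ite_false, List.nil_append]

set_option maxRecDepth 4000 in
theorem find_punctuations_spec : Claim_equal_find_punctuations := by
  intro text comma _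
  unfold Spec_find_punctuations find_punctuations find_punctuations_alt
  cases comma
  · exact pv_top text
      [['.'], ['?'], ['!'], ['.', '"'], ['?', '"'], ['!', '"'], ['.', '\''], ['?', '\''], ['!', '\'']]
      ['.', '?', '!'] (by intro c; simp) (by intro c hc; fin_cases hc <;> simp)
  · exact pv_top text
      [['.'], ['?'], ['!'], [','], ['.', '"'], ['?', '"'], ['!', '"'], ['.', '\''], ['?', '\''], ['!', '\'']]
      ['.', '?', '!', ','] (by intro c; simp) (by intro c hc; fin_cases hc <;> simp)
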